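-- pv_equiv track=rewrite | github.com/gpapachr/AoC2024 | day2.py | classify_reports
-- ===== SOURCE A (Python) =====
-- def is_safe_report(report):
--     # Check if the levels are all increasing or all decreasing
--     is_increasing = all(report[i] < report[i + 1] for i in range(len(report) - 1))
--     is_decreasing = all(report[i] > report[i + 1] for i in range(len(report) - 1))
--
--     if not (is_increasing or is_decreasing):
--         return False
--
--     # Check if differences between adjacent levels are between 1 and 3 (inclusive)
--     is_valid_difference = all(1 <= abs(report[i] - report[i + 1]) <= 3 for i in range(len(report) - 1))
--
--     return is_valid_difference
--
-- def classify_reports(reports):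
--     classifications = []
--     safe_count = 0
--     for report in reports:
--         is_safe = is_safe_report(report)
--         classifications.append(is_safe)
--         if is_safe:
--             safe_count += 1
--     return classifications, safe_count
-- ===== SOURCE B (Python) =====
-- def is_safe_report(report):
--     # Monotonicity via sorting: a report is monotone iff it equals its sorted
--     # version (increasing) or the reverse of it (decreasing); the gap condition
--     # (every adjacent |difference| in 1..3) then forces strictness.
--     s = sorted(report)
--     if report != s and report != s[::-1]:
--         return False
--     return all(1 <= abs(b - a) <= 3 for a, b in zip(report, report[1:]))
--
-- def classify_reports(reports):
--     flags = [is_safe_report(r) for r in reports]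
--     return flags, flags.count(True)
-- ===== Notes on version B (the rewrite author's own statement) =====
-- stated objective: alternative
-- what changed: B decides monotonicity by sorting: a report is monotone iff it equals sorted(report) or its reverse, then one gap check (1<=|diff|<=3) forces strictness, replacing A's three index-based monotonicity/difference scans; the safe count becomes flags.count(True) instead of an accumulator loop.
import Mathlib
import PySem

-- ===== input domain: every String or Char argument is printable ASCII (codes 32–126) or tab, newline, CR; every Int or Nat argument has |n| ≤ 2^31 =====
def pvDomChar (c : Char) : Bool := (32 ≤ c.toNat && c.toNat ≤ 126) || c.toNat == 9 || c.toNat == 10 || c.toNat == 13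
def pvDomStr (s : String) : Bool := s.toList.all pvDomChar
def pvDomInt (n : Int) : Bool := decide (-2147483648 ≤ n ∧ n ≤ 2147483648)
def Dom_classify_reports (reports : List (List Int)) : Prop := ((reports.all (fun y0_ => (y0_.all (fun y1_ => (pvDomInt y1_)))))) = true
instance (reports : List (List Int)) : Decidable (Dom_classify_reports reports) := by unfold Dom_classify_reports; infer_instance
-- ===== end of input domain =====

-- B decides monotonicity by comparing the report with its sorted version (or its reverse) and then checks the gap condition once; counting is flags.count(True) (objective: alternative; sorting costs more asymptotically but is a different mechanism).


-- ===== PORT A =====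
-- is_safe_report: three index-based scans over range(len(report)-1).
-- report[i] is always in range here, so the getD default 0 is never used.
def pvAll_range (n : Nat) (f : Nat → Bool) : Bool :=
  (List.range n).all f

def is_safe_report (report : List Int) : Bool :=
  let n := report.length
  let is_increasing := pvAll_range (n - 1) (fun i => decide (report.getD i 0 < report.getD (i+1) 0))
  let is_decreasing := pvAll_range (n - 1) (fun i => decide (report.getD i 0 > report.getD (i+1) 0))
  if !(is_increasing || is_decreasing) then
    false
  else
    pvAll_range (n - 1) (fun i => decide (1 ≤ (report.getD i 0 - report.getD (i+1) 0).natAbs ∧ (report.getD i 0 - report.getD (i+1) 0).natAbs ≤ 3))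

def classify_reports (reports : List (List Int)) : List Bool × Int :=
  reports.foldl
    (fun acc report =>
      let is_safe := is_safe_report report
      (acc.1 ++ [is_safe], if is_safe then acc.2 + 1 else acc.2))
    ([], 0)

-- ===== PORT B =====
-- B: report is monotone iff it equals sorted(report) or its reverse; one combined gap check.
def is_safe_report_alt (report : List Int) : Bool :=
  let s := PySem.List.sorted report (fun x => x) false
  if report ≠ s ∧ report ≠ s.reverse then
    false
  else
    (List.zipWith (fun a b => b - a) report report.tail).all
      (fun d => decide (1 ≤ d.natAbs ∧ d.natAbs ≤ 3))

def classify_reports_alt (reports : List (List Int)) : List Bool × Int :=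
  let flags := reports.map is_safe_report_alt
  (flags, (flags.count true : Int))

-- ===== PRECONDITION & SPEC =====
def Spec_classify_reports (reports : List (List Int)) (out : List Bool × Int) : Prop := out = classify_reports_alt reports
instance (reports : List (List Int)) (out : List Bool × Int) : Decidable (Spec_classify_reports reports out) := by unfold Spec_classify_reports; infer_instance

-- ===== CLAIM (what is proved, stated in full; the proofs are below) =====
def Claim_equal_classify_reports : Prop := ∀ (reports : List (List Int)), Dom_classify_reports reports → Spec_classify_reports reports (classify_reports reports)

-- ===== LEMMAS AND PROOFS =====

-- chain form of an adjacent-pairs test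
def pvChain (p : Int → Int → Bool) : List Int → Bool
  | [] => true
  | [_] => true
  | x :: y :: t => p x y && pvChain p (y :: t)

theorem pvAll_range_chain (p : Int → Int → Bool) (r : List Int) :
    pvAll_range (r.length - 1) (fun i => p (r.getD i 0) (r.getD (i+1) 0)) = pvChain p r := by
  induction r with
  | nil => simp [pvAll_range, pvChain]
  | cons x t ih =>
    cases t with
    | nil => simp [pvAll_range, pvChain]
    | cons y u =>
      have h := ih
      simp only [pvAll_range, pvChain, List.length_cons, Nat.add_sub_cancel,
        List.range_succ_eq_map, List.all_cons, List.all_map, List.getD_cons_zero,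
        List.getD_cons_succ] at h ⊢
      rw [← h]
      simp [Function.comp_def, List.getElem?_cons_succ]

theorem pvZip_chain (q : Int → Bool) (r : List Int) :
    (List.zipWith (fun a b => b - a) r r.tail).all q
      = pvChain (fun a b => q (b - a)) r := by
  induction r with
  | nil => simp [pvChain]
  | cons x t ih =>
    cases t with
    | nil => simp [pvChain]
    | cons y u =>
      simp [pvChain] at ih ⊢
      rw [← ih]

theorem pvChain_congr (p q : Int → Int → Bool) (h : ∀ a b, p a b = q a b) (r : List Int) :
    pvChain p r = pvChain q r := by
  induction r with
  | nil => rfl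
  | cons x t ih =>
    cases t with
    | nil => rfl
    | cons y u => simp [pvChain] at ih ⊢; rw [h, ih]

theorem pvChain_mono (p q : Int → Int → Bool)
    (h : ∀ a b, p a b = true → q a b = true) (r : List Int)
    (hc : pvChain p r = true) : pvChain q r = true := by
  induction r with
  | nil => rfl
  | cons x t ih =>
    cases t with
    | nil => rfl
    | cons y u =>
      simp only [pvChain, Bool.and_eq_true] at hc ⊢
      exact ⟨h _ _ hc.1, ih hc.2⟩

theorem pvChain_iff_pairwise (p : Int → Int → Bool)
    (hp : ∀ a b c, p a b = true → p b c = true → p a c = true) (r : List Int) :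
    pvChain p r = true ↔ r.Pairwise (fun a b => p a b = true) := by
  induction r with
  | nil => simp [pvChain]
  | cons x t ih =>
    cases t with
    | nil => simp [pvChain]
    | cons y u =>
      simp only [pvChain, Bool.and_eq_true, ih, List.pairwise_cons]
      constructor
      · rintro ⟨hxy, hy, hu⟩
        refine ⟨?_, hy, hu⟩
        intro b hb
        rcases List.mem_cons.mp hb with h | h
        · subst h; exact hxy
        · exact hp _ _ _ hxy (hy b h)
      · rintro ⟨hx, hy, hu⟩
        exact ⟨hx y (by simp), hy, hu⟩

theorem pairwise_chain (p : Int → Int → Bool) (r : List Int)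
    (h : r.Pairwise (fun a b => p a b = true)) : pvChain p r = true := by
  induction r with
  | nil => rfl
  | cons x t ih =>
    cases t with
    | nil => rfl
    | cons y u =>
      rcases List.pairwise_cons.mp h with ⟨hx, ht⟩
      simp only [pvChain, Bool.and_eq_true]
      exact ⟨hx y (by simp), ih ht⟩

theorem pvChain_and (p q : Int → Int → Bool) (r : List Int) :
    (pvChain p r && pvChain q r) = pvChain (fun a b => p a b && q a b) r := by
  induction r with
  | nil => simp [pvChain]
  | cons x t ih =>
    cases t with
    | nil => simp [pvChain]
    | cons y u =>
      simp [pvChain] at ih ⊢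
      rw [← ih]
      by_cases h1 : p x y <;> by_cases h2 : q x y <;> simp [h1, h2]

-- a chain that is both weakly monotone and gap-valid is a strict chain
theorem chain_le_gap (p : Int → Int → Bool) (r : List Int)
    (hle : pvChain p r = true)
    (hvd : pvChain (fun a b => decide (1 ≤ (b - a).natAbs ∧ (b - a).natAbs ≤ 3)) r = true)
    (q : Int → Int → Bool)
    (h : ∀ a b, p a b = true → (1 ≤ (b - a).natAbs ∧ (b - a).natAbs ≤ 3) → q a b = true) :
    pvChain q r = true := by
  have hand := pvChain_and p (fun a b => decide (1 ≤ (b - a).natAbs ∧ (b - a).natAbs ≤ 3)) r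
  have hb : pvChain (fun a b => p a b && decide (1 ≤ (b - a).natAbs ∧ (b - a).natAbs ≤ 3)) r = true := by
    rw [← hand, hle, hvd]; rfl
  exact pvChain_mono _ _ (fun a b hab => by
    simp only [Bool.and_eq_true, decide_eq_true_eq] at hab
    exact h a b hab.1 hab.2) r hb

-- under the gap condition, "increasing chain" ↔ "report equals its sorted version"
theorem inc_iff_sorted (r : List Int)
    (hvd : pvChain (fun a b => decide (1 ≤ (b - a).natAbs ∧ (b - a).natAbs ≤ 3)) r = true) :
    pvChain (fun a b => decide (a < b)) r = decide (r = PySem.List.sorted r (fun x => x) false) := by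
  by_cases h : pvChain (fun a b => decide (a < b)) r = true
  · have hpw : r.Pairwise (fun a b : Int => a < b) := by
      have := (pvChain_iff_pairwise (fun a b => decide (a < b))
        (fun a b c hab hbc => by simp at *; omega) r).mp h
      simpa using this
    have hs := PySem.List.sorted_eq_of_perm_of_pairwise_lt r r (fun x : Int => x)
      (List.Perm.refl r) (by simpa using hpw)
    simp [h, hs]
  · rw [Bool.not_eq_true] at h
    rw [h]
    by_cases hr : r = PySem.List.sorted r (fun x => x) false
    · exfalso
      have hpw : r.Pairwise (fun a b : Int => a ≤ b) := by
        have := PySem.List.sorted_pairwise r (fun x : Int => x)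
        rw [← hr] at this
        simpa using this
      have hle : pvChain (fun a b => decide (a ≤ b)) r = true :=
        pairwise_chain _ r (by simpa using hpw)
      have : pvChain (fun a b => decide (a < b)) r = true :=
        chain_le_gap _ r hle hvd _ (fun a b hab hg => by simp at *; omega)
      rw [h] at this
      exact Bool.false_ne_true this
    · simp [hr]

-- under the gap condition, "decreasing chain" ↔ "report equals the reverse of its sorted version"
theorem dec_iff_sorted (r : List Int)
    (hvd : pvChain (fun a b => decide (1 ≤ (b - a).natAbs ∧ (b - a).natAbs ≤ 3)) r = true) :
    pvChain (fun a b => decide (a > b)) r = decide (r = (PySem.List.sorted r (fun x => x) false).reverse) := by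
  by_cases h : pvChain (fun a b => decide (a > b)) r = true
  · have hpw : r.Pairwise (fun a b : Int => b < a) := by
      have := (pvChain_iff_pairwise (fun a b => decide (a > b))
        (fun a b c hab hbc => by simp at *; omega) r).mp h
      simpa using this
    have hrev : r.reverse.Pairwise (fun a b : Int => a < b) :=
      (List.pairwise_reverse).mpr (by simpa using hpw)
    have hs := PySem.List.sorted_eq_of_perm_of_pairwise_lt r r.reverse (fun x : Int => x)
      (r.reverse_perm) (by simpa using hrev)
    simp [h, hs]
  · rw [Bool.not_eq_true] at h
    rw [h]
    by_cases hr : r = (PySem.List.sorted r (fun x => x) false).reverse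
    · exfalso
      have hrev : r.reverse = PySem.List.sorted r (fun x => x) false := by
        have := congrArg List.reverse hr
        simpa using this
      have hpwrev : r.reverse.Pairwise (fun a b : Int => a ≤ b) := by
        have := PySem.List.sorted_pairwise r (fun x : Int => x)
        rw [← hrev] at this
        simpa using this
      have hpw : r.Pairwise (fun a b : Int => b ≤ a) := by
        have := (List.pairwise_reverse).mp hpwrev
        simpa using this
      have hle : pvChain (fun a b => decide (b ≤ a)) r = true :=
        pairwise_chain _ r (by simpa using hpw)
      have : pvChain (fun a b => decide (a > b)) r = true :=
        chain_le_gap _ r hle hvd _ (fun a b hab hg => by simp at *; omega)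
      rw [h] at this
      exact Bool.false_ne_true this
    · simp [hr]

theorem pvIf_norm (P1 P2 : Prop) [Decidable P1] [Decidable P2] (v : Bool) :
    (if !(decide P1 || decide P2) then false else v) = (if ¬P1 ∧ ¬P2 then false else v) := by
  split_ifs <;> simp_all

theorem is_safe_eq (report : List Int) : is_safe_report report = is_safe_report_alt report := by
  simp only [is_safe_report, is_safe_report_alt]
  rw [pvAll_range_chain (fun a b => decide (a < b)),
    pvAll_range_chain (fun a b => decide (a > b)),
    pvAll_range_chain (fun a b => decide (1 ≤ (a - b).natAbs ∧ (a - b).natAbs ≤ 3)),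
    pvZip_chain]
  have habs : pvChain (fun a b => decide (1 ≤ (a - b).natAbs ∧ (a - b).natAbs ≤ 3)) report
      = pvChain (fun a b => decide (1 ≤ (b - a).natAbs ∧ (b - a).natAbs ≤ 3)) report :=
    pvChain_congr _ _ (fun a b => by
      have : (a - b).natAbs = (b - a).natAbs := by omega
      rw [this]) report
  rw [habs]
  by_cases hvd : pvChain (fun a b => decide (1 ≤ (b - a).natAbs ∧ (b - a).natAbs ≤ 3)) report = true
  · rw [inc_iff_sorted report hvd, dec_iff_sorted report hvd, pvIf_norm]
  · rw [Bool.not_eq_true] at hvd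
    rw [hvd]
    by_cases h1 : pvChain (fun a b => decide (a < b)) report <;>
      by_cases h2 : pvChain (fun a b => decide (a > b)) report <;>
        split_ifs <;> simp_all

theorem classify_fold (reports : List (List Int)) (acc : List Bool) (c : Int) :
    reports.foldl
      (fun acc report =>
        let is_safe := is_safe_report report
        (acc.1 ++ [is_safe], if is_safe then acc.2 + 1 else acc.2))
      (acc, c)
    = (acc ++ reports.map is_safe_report_alt,
       c + ((reports.map is_safe_report_alt).count true : Int)) := by
  induction reports generalizing acc c with
  | nil => simp
  | cons r t ih =>
    simp only [List.foldl_cons, List.map_cons]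
    rw [ih, is_safe_eq]
    by_cases h : is_safe_report_alt r <;> simp [h] <;> ring

-- ===== VERDICT (by name: the statement is the Claim_ definition above) =====
theorem classify_reports_spec : Claim_equal_classify_reports := by
  intro reports _
  unfold Spec_classify_reports classify_reports classify_reports_alt
  simpa using classify_fold reports [] 0
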